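-- pv_equiv track=rewrite | github.com/pypi-data/pypi-mirror-379 | packages/prompt-chorus/prompt_chorus-0.1.2.tar.gz/prompt_chorus-0.1.2/src/prompt_chorus/utils/prompt_extraction.py | _extract_openai_prompt
-- ===== SOURCE A (Python) =====
-- def _extract_openai_prompt(kwargs):
--     """Extract meaningful prompt parts from OpenAI API call"""
--     messages = kwargs.get('messages', [])
--
--     system_prompt = None
--     user_prompt = None
--     conversation_history = []
--
--     for message in messages:
--         role = message.get('role')
--         content = message.get('content', '')
--
--         if role == 'system':
--             system_prompt = content
--         elif role == 'user':
--             user_prompt = content  # Take the last user message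
--         elif role == 'assistant':
--             conversation_history.append(content)
--
--     return {
--         'messages': messages,
--         'system_prompt': system_prompt,
--         'user_prompt': user_prompt,
--         'conversation_history': conversation_history
--     }
-- ===== SOURCE B (Python) =====
-- def _extract_openai_prompt(kwargs):
--     """Extract meaningful prompt parts from OpenAI API call"""
--     messages = kwargs.get('messages', [])
--     return {
--         'messages': messages,
--         'system_prompt': next((m.get('content', '') for m in reversed(messages)
--                                if m.get('role') == 'system'), None),
--         'user_prompt': next((m.get('content', '') for m in reversed(messages)
--                              if m.get('role') == 'user'), None),
--         'conversation_history': [m.get('content', '') for m in messages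
--                                  if m.get('role') == 'assistant'],
--     }
-- ===== Notes on version B (the rewrite author's own statement) =====
-- stated objective: idiomatic
-- what changed: The single mutating dispatch loop is replaced by three independent declarative passes: last-match searches over reversed(messages) for the system and user prompts and one filtered comprehension for the assistant history, with no loop state at all.
import Mathlib
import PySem

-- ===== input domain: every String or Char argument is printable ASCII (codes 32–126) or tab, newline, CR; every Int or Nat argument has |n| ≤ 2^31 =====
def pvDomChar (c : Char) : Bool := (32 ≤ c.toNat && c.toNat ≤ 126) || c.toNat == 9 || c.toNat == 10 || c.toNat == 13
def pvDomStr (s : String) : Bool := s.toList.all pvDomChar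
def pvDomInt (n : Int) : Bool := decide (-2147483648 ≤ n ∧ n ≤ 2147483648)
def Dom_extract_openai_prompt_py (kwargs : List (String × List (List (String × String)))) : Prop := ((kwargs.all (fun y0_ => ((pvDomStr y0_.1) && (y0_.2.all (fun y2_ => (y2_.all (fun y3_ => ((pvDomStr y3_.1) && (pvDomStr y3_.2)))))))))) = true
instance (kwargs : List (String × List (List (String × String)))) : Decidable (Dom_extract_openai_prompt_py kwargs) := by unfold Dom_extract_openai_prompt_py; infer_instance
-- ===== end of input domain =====

-- B replaces A's single mutating dispatch loop by three independent declarative passes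
-- (reversed last-match searches for system/user, a filtered pass for the history); same values.
-- Rendering note: the Python dict holds bare strings for 'system_prompt', 'user_prompt' and the
-- 'conversation_history' elements, which the declared return type
-- List (String × Option (List (List (String × String)))) cannot hold directly; BOTH ports render
-- each such content string c injectively as the singleton dict [("content", c)] (a prompt string
-- becomes some [[("content", c)]]); everything else is exact.

-- Python d.get(k[, default]): first binding wins
def pvGet? {β : Type} (d : List (String × β)) (k : String) : Option β :=
  (d.find? (fun p => p.1 == k)).map Prod.snd

def pvRole (m : List (String × String)) : Option String := pvGet? m "role"
def pvContent (m : List (String × String)) : String := (pvGet? m "content").getD ""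
-- the injective rendering of a bare content string into the declared value type
def pvWrap (c : String) : List (String × String) := [("content", c)]

-- ===== PORT A =====
-- the loop body of A: one state triple (system_prompt, user_prompt, conversation_history)
def pvStepA (st : Option String × Option String × List String) (m : List (String × String)) :
    Option String × Option String × List String :=
  let role := pvRole m
  let content := pvContent m
  if role == some "system" then (some content, st.2.1, st.2.2)
  else if role == some "user" then (st.1, some content, st.2.2)
  else if role == some "assistant" then (st.1, st.2.1, st.2.2 ++ [content])
  else st

def extract_openai_prompt_py (kwargs : List (String × List (List (String × String)))) :
    List (String × Option (List (List (String × String)))) :=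
  let messages := (pvGet? kwargs "messages").getD []
  let st := messages.foldl pvStepA (none, none, [])
  [("messages", some messages),
   ("system_prompt", st.1.map (fun c => [pvWrap c])),
   ("user_prompt", st.2.1.map (fun c => [pvWrap c])),
   ("conversation_history", some (st.2.2.map pvWrap))]

-- ===== PORT B =====
def extract_openai_prompt_py_alt (kwargs : List (String × List (List (String × String)))) :
    List (String × Option (List (List (String × String)))) :=
  let messages := (pvGet? kwargs "messages").getD []
  let sys := (messages.reverse.find? (fun m => pvRole m == some "system")).map pvContent
  let usr := (messages.reverse.find? (fun m => pvRole m == some "user")).map pvContent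
  let hist := (messages.filter (fun m => pvRole m == some "assistant")).map pvContent
  [("messages", some messages),
   ("system_prompt", sys.map (fun c => [pvWrap c])),
   ("user_prompt", usr.map (fun c => [pvWrap c])),
   ("conversation_history", some (hist.map pvWrap))]

-- ===== PRECONDITION & SPEC =====
def Spec_extract_openai_prompt_py (kwargs : List (String × List (List (String × String)))) (out : List (String × Option (List (List (String × String))))) : Prop := out = extract_openai_prompt_py_alt kwargs
instance (kwargs : List (String × List (List (String × String)))) (out : List (String × Option (List (List (String × String))))) : Decidable (Spec_extract_openai_prompt_py kwargs out) := by unfold Spec_extract_openai_prompt_py; infer_instance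

-- ===== CLAIM =====
def Claim_equal_extract_openai_prompt_py : Prop := ∀ (kwargs : List (String × List (List (String × String)))), Dom_extract_openai_prompt_py kwargs → Spec_extract_openai_prompt_py kwargs (extract_openai_prompt_py kwargs)

-- ===== LEMMAS AND PROOFS =====

-- A's last-overwrite of system_prompt is B's first match over the reversed list.
theorem foldA_sys (ms : List (List (String × String)))
    (st : Option String × Option String × List String) :
    (ms.foldl pvStepA st).1 =
      ((ms.reverse.find? (fun m => pvRole m == some "system")).map pvContent).or st.1 := by
  induction ms generalizing st with
  | nil => simp
  | cons m ms ih =>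
    simp only [List.foldl_cons, ih, List.reverse_cons, List.find?_append]
    cases hf : ms.reverse.find? (fun m => pvRole m == some "system") with
    | some m' => simp
    | none =>
      simp only [Option.map_none, Option.none_or, List.find?_cons, List.find?_nil]
      unfold pvStepA
      by_cases h1 : pvRole m == some "system"
      · simp [h1]
      · by_cases h2 : pvRole m == some "user" <;> by_cases h3 : pvRole m == some "assistant" <;>
          simp [h1, h2, h3]

-- likewise for user_prompt.
theorem foldA_usr (ms : List (List (String × String)))
    (st : Option String × Option String × List String) :
    (ms.foldl pvStepA st).2.1 =
      ((ms.reverse.find? (fun m => pvRole m == some "user")).map pvContent).or st.2.1 := by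
  induction ms generalizing st with
  | nil => simp
  | cons m ms ih =>
    simp only [List.foldl_cons, ih, List.reverse_cons, List.find?_append]
    cases hf : ms.reverse.find? (fun m => pvRole m == some "user") with
    | some m' => simp
    | none =>
      simp only [Option.map_none, Option.none_or, List.find?_cons, List.find?_nil]
      unfold pvStepA
      by_cases h1 : pvRole m == some "system"
      · have : ¬ (pvRole m == some "user") = true := by
          simp only [beq_iff_eq] at h1 ⊢; simp [h1]
        simp [h1, this]
      · by_cases h2 : pvRole m == some "user" <;> by_cases h3 : pvRole m == some "assistant" <;>
          simp [h1, h2, h3]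

-- A's appended history is B's filtered forward pass.
theorem foldA_hist (ms : List (List (String × String)))
    (st : Option String × Option String × List String) :
    (ms.foldl pvStepA st).2.2 =
      st.2.2 ++ (ms.filter (fun m => pvRole m == some "assistant")).map pvContent := by
  induction ms generalizing st with
  | nil => simp
  | cons m ms ih =>
    simp only [List.foldl_cons, ih, List.filter_cons]
    unfold pvStepA
    by_cases h1 : pvRole m == some "system"
    · have : ¬ (pvRole m == some "assistant") = true := by
        simp only [beq_iff_eq] at h1 ⊢; simp [h1]
      simp [h1, this]
    · by_cases h2 : pvRole m == some "user"
      · have : ¬ (pvRole m == some "assistant") = true := by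
          simp only [beq_iff_eq] at h2 ⊢; simp [h2]
        simp [h1, h2, this]
      · by_cases h3 : pvRole m == some "assistant" <;> simp [h1, h2, h3]

-- the ports agree on EVERY input.
theorem ports_eq (kwargs : List (String × List (List (String × String)))) :
    extract_openai_prompt_py kwargs = extract_openai_prompt_py_alt kwargs := by
  unfold extract_openai_prompt_py extract_openai_prompt_py_alt
  simp only [foldA_sys, foldA_usr, foldA_hist, Option.or_none, List.nil_append]

-- ===== VERDICT =====
theorem extract_openai_prompt_py_spec : Claim_equal_extract_openai_prompt_py := by
  intro kwargs _
  unfold Spec_extract_openai_prompt_py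
  exact ports_eq kwargs
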